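-- pv_equiv track=rewrite | github.com/chriskormaris/NaiveBayesClassifierInPython | NaiveBayesClassifier.py | calculate_label_tokens_frequencies
-- ===== SOURCE A (Python) =====
-- def calculate_label_tokens_frequencies(label_feature_tokens, feature_vectors, label):
--     laplace_estimate_frequencies = dict()  # same size as a feature vector
--
--     # For each feature token count how many documents of the given class contain it.
--     for (i, vector) in enumerate(feature_vectors):
--         for j in range(len(label_feature_tokens)):
--             token = label_feature_tokens[j]
--             if vector[j] >= 1:
--                 if laplace_estimate_frequencies.__contains__(token):
--                     laplace_estimate_frequencies[token] = laplace_estimate_frequencies[token] + vector[j]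
--                 else:
--                     laplace_estimate_frequencies[token] = vector[j]
--
--     return laplace_estimate_frequencies
-- ===== SOURCE B (Python) =====
-- def calculate_label_tokens_frequencies(label_feature_tokens, feature_vectors, label):
--     # Gather-then-group: flatten the qualifying (token, count) cells once,
--     # then build the dict by ordered-deduplicated token with one sum per token.
--     pairs = [(t, v) for vector in feature_vectors
--              for t, v in zip(label_feature_tokens, vector) if v >= 1]
--     return {t: sum(v for u, v in pairs if u == t)
--             for t in dict.fromkeys(t for t, _ in pairs)}
-- ===== Notes on version B (the rewrite author's own statement) =====
-- stated objective: alternative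
-- what changed: Replaces the incremental dict accumulation over nested row/column index loops with a gather-then-group pass: flatten all qualifying (token,count) cells once via zip, then build the result from the ordered-deduplicated token list with one sum per token.
import Mathlib
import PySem

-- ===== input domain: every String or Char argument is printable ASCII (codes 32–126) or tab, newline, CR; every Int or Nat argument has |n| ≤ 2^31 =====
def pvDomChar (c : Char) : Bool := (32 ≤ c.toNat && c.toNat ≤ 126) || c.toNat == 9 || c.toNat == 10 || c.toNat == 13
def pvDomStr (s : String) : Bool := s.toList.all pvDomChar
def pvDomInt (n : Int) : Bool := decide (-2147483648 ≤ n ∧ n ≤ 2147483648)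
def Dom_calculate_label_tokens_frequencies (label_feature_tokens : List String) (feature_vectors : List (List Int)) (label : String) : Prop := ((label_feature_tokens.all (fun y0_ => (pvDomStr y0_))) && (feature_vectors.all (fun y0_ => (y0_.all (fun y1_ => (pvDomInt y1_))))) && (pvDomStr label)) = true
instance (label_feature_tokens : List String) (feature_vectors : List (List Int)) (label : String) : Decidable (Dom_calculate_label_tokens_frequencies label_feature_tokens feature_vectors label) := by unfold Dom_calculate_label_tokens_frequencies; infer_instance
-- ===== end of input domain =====

-- B replaces A's incremental dict accumulation over nested index loops by a
-- gather-then-group pass (flatten qualifying cells, ordered dedup of tokens, one sum per token);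
-- same return value, a different decomposition ('alternative').

-- ===== PORT A =====
def calculate_label_tokens_frequencies (label_feature_tokens : List String) (feature_vectors : List (List Int)) (label : String) : List (String × Int) :=
  ((PySem.List.enumerate feature_vectors).foldl (fun d iv =>
      (PySem.List.pyRange 0 (PySem.List.len label_feature_tokens) 1).foldl (fun d j =>
        let token := PySem.List.pyGetD label_feature_tokens j ""
        let v := PySem.List.pyGetD iv.2 j 0
        if 1 ≤ v then
          if d.contains token then d.insert token (d.getD token 0 + v)
          else d.insert token v
        else d) d)
    PySem.Dict.empty).items

-- ===== PORT B =====
def calculate_label_tokens_frequencies_alt (label_feature_tokens : List String) (feature_vectors : List (List Int)) (label : String) : List (String × Int) :=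
  let pairs := feature_vectors.flatMap (fun vector =>
    (label_feature_tokens.zip vector).filter (fun p => decide (1 ≤ p.2)))
  ((PySem.List.dedup (pairs.map (·.1))).foldl
      (fun d t => d.insert t (((pairs.filter (fun p => p.1 == t)).map (·.2)).sum))
    PySem.Dict.empty).items

-- ===== PRECONDITION & SPEC =====
-- A indexes each vector at every position of label_feature_tokens, so it raises IndexError
-- exactly when some vector is shorter than the token list; those inputs are excluded.
def Pre_calculate_label_tokens_frequencies (label_feature_tokens : List String) (feature_vectors : List (List Int)) (label : String) : Prop :=
  ∀ v ∈ feature_vectors, label_feature_tokens.length ≤ v.length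
instance (label_feature_tokens : List String) (feature_vectors : List (List Int)) (label : String) : Decidable (Pre_calculate_label_tokens_frequencies label_feature_tokens feature_vectors label) := by unfold Pre_calculate_label_tokens_frequencies; infer_instance
def pvWitness_calculate_label_tokens_frequencies : List String × List (List Int) × String := (["a", "b"], [[1, 0], [2, 3]], "x")

def Spec_calculate_label_tokens_frequencies (label_feature_tokens : List String) (feature_vectors : List (List Int)) (label : String) (out : List (String × Int)) : Prop := out = calculate_label_tokens_frequencies_alt label_feature_tokens feature_vectors label
instance (label_feature_tokens : List String) (feature_vectors : List (List Int)) (label : String) (out : List (String × Int)) : Decidable (Spec_calculate_label_tokens_frequencies label_feature_tokens feature_vectors label out) := by unfold Spec_calculate_label_tokens_frequencies; infer_instance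

-- ===== CLAIM (what is proved, stated in full; the proofs are below) =====
def Claim_equal_calculate_label_tokens_frequencies : Prop := ∀ (label_feature_tokens : List String) (feature_vectors : List (List Int)) (label : String), Dom_calculate_label_tokens_frequencies label_feature_tokens feature_vectors label → Pre_calculate_label_tokens_frequencies label_feature_tokens feature_vectors label → Spec_calculate_label_tokens_frequencies label_feature_tokens feature_vectors label (calculate_label_tokens_frequencies label_feature_tokens feature_vectors label)

-- ===== LEMMAS AND PROOFS =====

-- the shared accumulation step: d[t] = d.get(t, 0) + v
def pvStep (d : PySem.Dict String Int) (p : String × Int) : PySem.Dict String Int :=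
  d.insert p.1 (d.getD p.1 0 + p.2)

-- the row-major list of qualifying (token, count) cells
def pvCells (label_feature_tokens : List String) (feature_vectors : List (List Int)) : List (String × Int) :=
  feature_vectors.flatMap (fun vector =>
    (label_feature_tokens.zip vector).filter (fun p => decide (1 ≤ p.2)))

theorem pvBody_eq (d : PySem.Dict String Int) (t : String) (v : Int) :
    (if d.contains t then d.insert t (d.getD t 0 + v) else d.insert t v) = pvStep d (t, v) := by
  by_cases h : d.contains t
  · simp [pvStep, h]
  · simp only [Bool.not_eq_true] at h
    simp [pvStep, h, PySem.Dict.getD_of_not_contains, zero_add]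

theorem pvGetD_foldl_step (l : List (String × Int)) (d : PySem.Dict String Int) (t : String) :
    (l.foldl pvStep d).getD t 0
      = d.getD t 0 + ((l.filter (fun p => p.1 == t)).map (·.2)).sum := by
  induction l generalizing d with
  | nil => simp
  | cons p l ih =>
    by_cases h : p.1 = t
    · simp [List.foldl_cons, ih, pvStep, h]
      omega
    · simp [List.foldl_cons, ih, pvStep, PySem.Dict.getD_insert, h, Ne.symm h]

theorem pvInner (ts : List String) (vs : List Int) (d : PySem.Dict String Int)
    (h : ts.length ≤ vs.length) :
    (List.range ts.length).foldl
        (fun d j => if 1 ≤ vs.getD j 0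
          then pvStep d (ts.getD j "", vs.getD j 0) else d) d
      = ((ts.zip vs).filter (fun p => decide (1 ≤ p.2))).foldl pvStep d := by
  induction ts generalizing vs d with
  | nil => simp
  | cons t ts ih =>
    cases vs with
    | nil => simp at h
    | cons v vs =>
      simp only [List.length_cons, List.range_succ_eq_map, List.foldl_cons, List.foldl_map,
        List.getD_cons_zero, List.getD_cons_succ, List.zip_cons_cons, List.filter_cons]
      by_cases hv : 1 ≤ v
      · rw [if_pos hv, if_pos (show decide (1 ≤ v) = true by simpa using hv), List.foldl_cons]
        exact ih vs (pvStep d (t, v)) (by simpa using h)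
      · rw [if_neg hv, if_neg (show ¬ decide (1 ≤ v) = true by simpa using hv)]
        exact ih vs d (by simpa using h)

-- the port's inner index loop is the fold of pvStep over the row's qualifying cells
theorem pvInnerPort (ts : List String) (vec : List Int) (d : PySem.Dict String Int)
    (h : ts.length ≤ vec.length) :
    (PySem.List.pyRange 0 (PySem.List.len ts) 1).foldl (fun d j =>
        if 1 ≤ PySem.List.pyGetD vec j 0 then
          if d.contains (PySem.List.pyGetD ts j "")
          then d.insert (PySem.List.pyGetD ts j "")
            (d.getD (PySem.List.pyGetD ts j "") 0 + PySem.List.pyGetD vec j 0)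
          else d.insert (PySem.List.pyGetD ts j "") (PySem.List.pyGetD vec j 0)
        else d) d
      = ((ts.zip vec).filter (fun p => decide (1 ≤ p.2))).foldl pvStep d := by
  rw [← pvInner ts vec d h]
  rw [show PySem.List.len ts = ((ts.length : Nat) : Int) from rfl,
    PySem.List.pyRange_zero_nat, List.foldl_map]
  congr 1
  funext d j
  simp only [PySem.List.pyGetD_natCast]
  rw [← pvBody_eq]

-- the port's outer enumerate loop folds pvStep over all rows' qualifying cells
theorem pvA_outer (ts : List String) (vecs : List (List Int)) (s : Int)
    (d : PySem.Dict String Int) (h : ∀ v ∈ vecs, ts.length ≤ v.length) :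
    (PySem.List.enumerate vecs s).foldl (fun d iv =>
        (PySem.List.pyRange 0 (PySem.List.len ts) 1).foldl (fun d j =>
          if 1 ≤ PySem.List.pyGetD iv.2 j 0 then
            if d.contains (PySem.List.pyGetD ts j "")
            then d.insert (PySem.List.pyGetD ts j "")
              (d.getD (PySem.List.pyGetD ts j "") 0 + PySem.List.pyGetD iv.2 j 0)
            else d.insert (PySem.List.pyGetD ts j "") (PySem.List.pyGetD iv.2 j 0)
          else d) d) d
      = (pvCells ts vecs).foldl pvStep d := by
  induction vecs generalizing s d with
  | nil => simp [PySem.List.enumerate_nil, pvCells]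
  | cons vec vecs ih =>
    simp only [PySem.List.enumerate_cons, List.foldl_cons]
    rw [pvInnerPort ts vec d (h vec (List.mem_cons_self ..)),
      ih (s + 1) _ (fun v hv => h v (List.mem_cons_of_mem _ hv))]
    rw [show pvCells ts (vec :: vecs)
        = ((ts.zip vec).filter (fun p => decide (1 ≤ p.2))) ++ pvCells ts vecs from rfl,
      List.foldl_append]

theorem calculate_label_tokens_frequencies_spec : Claim_equal_calculate_label_tokens_frequencies := by
  intro ts vecs lab _hdom hpre
  unfold Spec_calculate_label_tokens_frequencies
  have hA : calculate_label_tokens_frequencies ts vecs lab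
      = ((pvCells ts vecs).foldl pvStep PySem.Dict.empty).items := by
    unfold calculate_label_tokens_frequencies
    exact congrArg PySem.Dict.items (pvA_outer ts vecs 0 PySem.Dict.empty hpre)
  rw [hA]
  unfold calculate_label_tokens_frequencies_alt
  have hc : (vecs.flatMap (fun vector =>
      (ts.zip vector).filter (fun p => decide (1 ≤ p.2)))) = pvCells ts vecs := rfl
  rw [hc]
  set pairs := pvCells ts vecs with hpairs
  have hfold : (List.foldl pvStep PySem.Dict.empty pairs)
      = pairs.foldl (fun d x => d.insert x.1 (d.getD x.1 0 + x.2)) PySem.Dict.empty := rfl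
  -- keys of A's dict: ordered dedup of the qualifying tokens
  have hkeys : (pairs.foldl pvStep PySem.Dict.empty).keys
      = PySem.List.dedup (pairs.map (·.1)) := by
    rw [hfold, PySem.Dict.keys_foldl_insert_key]
    have he : (PySem.Dict.empty : PySem.Dict String Int).keys = ([] : List String) := rfl
    rw [he, PySem.List.dedup_eq_ofList, PySem.Set.ofList_eq_foldl]
    rfl
  have hnodup : (pairs.foldl pvStep PySem.Dict.empty).keys.Nodup := by
    rw [hkeys]; exact PySem.List.nodup_dedup _
  rw [PySem.Dict.items_eq_map_keys _ hnodup 0, hkeys]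
  rw [PySem.Dict.items_foldl_insert_fresh _ _ _ _
      (fun a _ => PySem.Dict.contains_empty a)
      (by simpa using PySem.List.nodup_dedup (pairs.map (·.1)))]
  rw [show (PySem.Dict.empty : PySem.Dict String Int).items = ([] : List (String × Int)) from rfl, List.nil_append]
  apply List.map_congr_left
  intro t _
  rw [pvGetD_foldl_step]
  simp
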